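-- pv_equiv track=rewrite | github.com/gedemais/zappy | client/action/move.py | dummy_path
-- ===== SOURCE A (Python) =====
-- def		dummy_path(x, y, tx, ty):
-- 	front, back, right, left = 0, 0, 0, 0
--
-- 	while y < ty:
-- 		y += 1
-- 		front += 1
-- 	while y > ty:
-- 		y -= 1
-- 		back += 1
-- 	while x < tx:
-- 		x += 1
-- 		right += 1
-- 	while x > tx:
-- 		x -=1
-- 		left += 1
-- 	return front, back, right, left
-- ===== SOURCE B (Python) =====
-- def dummy_path(x, y, tx, ty):
--     # Closed form: each while loop in A just counts the positive part of a difference.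
--     return max(ty - y, 0), max(y - ty, 0), max(tx - x, 0), max(x - tx, 0)
-- ===== Notes on version B (the rewrite author's own statement) =====
-- stated objective: faster
-- what changed: Replaced the four unit-step while loops with a closed-form max(diff,0) for each direction.
import Mathlib
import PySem

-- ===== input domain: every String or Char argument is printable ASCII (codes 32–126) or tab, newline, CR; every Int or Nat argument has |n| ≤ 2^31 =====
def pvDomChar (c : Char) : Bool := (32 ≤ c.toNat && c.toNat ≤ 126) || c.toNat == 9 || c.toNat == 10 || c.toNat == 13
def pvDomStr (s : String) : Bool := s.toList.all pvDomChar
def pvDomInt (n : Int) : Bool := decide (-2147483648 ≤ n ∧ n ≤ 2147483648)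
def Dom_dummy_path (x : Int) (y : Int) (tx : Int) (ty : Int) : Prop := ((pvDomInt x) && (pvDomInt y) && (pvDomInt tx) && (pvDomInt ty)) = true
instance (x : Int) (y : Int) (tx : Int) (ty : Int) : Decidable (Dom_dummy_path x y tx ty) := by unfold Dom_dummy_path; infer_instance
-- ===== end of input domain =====

-- B replaces A's four unit-step counting loops with the closed form max(diff, 0) per direction (faster).


-- ===== PORT A =====
-- 'while y < ty: y += 1; front += 1' — counts the steps taken.
def dp_up (y ty : Int) (acc : Int) : Int :=
  if y < ty then dp_up (y + 1) ty (acc + 1) else acc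
termination_by (ty - y).toNat
decreasing_by omega

-- 'while y > ty: y -= 1; back += 1'
def dp_down (y ty : Int) (acc : Int) : Int :=
  if y > ty then dp_down (y - 1) ty (acc + 1) else acc
termination_by (y - ty).toNat
decreasing_by omega

def dummy_path (x : Int) (y : Int) (tx : Int) (ty : Int) : List Int :=
  let front := dp_up y ty 0
  let y := if y < ty then ty else y
  let back := dp_down y ty 0
  let right := dp_up x tx 0
  let x := if x < tx then tx else x
  let left := dp_down x tx 0
  [front, back, right, left]

-- ===== PORT B =====
def dummy_path_alt (x : Int) (y : Int) (tx : Int) (ty : Int) : List Int :=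
  [max (ty - y) 0, max (y - ty) 0, max (tx - x) 0, max (x - tx) 0]

-- ===== PRECONDITION & SPEC =====
def Spec_dummy_path (x : Int) (y : Int) (tx : Int) (ty : Int) (out : List Int) : Prop := out = dummy_path_alt x y tx ty
instance (x : Int) (y : Int) (tx : Int) (ty : Int) (out : List Int) : Decidable (Spec_dummy_path x y tx ty out) := by unfold Spec_dummy_path; infer_instance

-- ===== CLAIM (what is proved, stated in full; the proofs are below) =====
def Claim_equal_dummy_path : Prop := ∀ (x : Int) (y : Int) (tx : Int) (ty : Int), Dom_dummy_path x y tx ty → Spec_dummy_path x y tx ty (dummy_path x y tx ty)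

-- ===== LEMMAS AND PROOFS =====
theorem dp_up_eq (y ty acc : Int) : dp_up y ty acc = acc + max (ty - y) 0 := by
  fun_induction dp_up y ty acc with
  | case1 a b c ih => rw [ih]; omega
  | case2 a b c => omega

theorem dp_down_eq (y ty acc : Int) : dp_down y ty acc = acc + max (y - ty) 0 := by
  fun_induction dp_down y ty acc with
  | case1 a b c ih => rw [ih]; omega
  | case2 a b c => omega

-- ===== VERDICT (by name: the statement is the Claim_ definition above) =====
theorem dummy_path_spec : Claim_equal_dummy_path := by
  intro x y tx ty _
  unfold Spec_dummy_path dummy_path dummy_path_alt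
  simp only [dp_up_eq, dp_down_eq]
  split_ifs <;> (simp only [List.cons.injEq, and_true]; refine ⟨by omega, by omega, by omega, by omega⟩)
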